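-- pv_equiv track=rewrite | github.com/lalapopa/wordle_cracker | main.py | accept_yellow_pos
-- ===== SOURCE A (Python) =====
-- def accept_yellow_pos(word, y_p):
--     if y_p:
--         syms = []
--         for val in y_p.keys():
--             if val not in word:
--                 return False
--
--         for i, sym in enumerate(word):
--             for key, positions in y_p.items():
--                 if sym == key:
--                     if i in positions:
--                         return False
--     return True
-- ===== SOURCE B (Python) =====
-- def accept_yellow_pos(word, y_p):
--     n = len(word)
--     return all(
--         key in word
--         and not any(0 <= p < n and word[p] == key for p in positions)
--         for key, positions in y_p.items()
--     )
-- ===== Notes on version B (the rewrite author's own statement) =====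
-- stated objective: simpler
-- what changed: B scans the constraints and indexes into the word (presence check plus a direct bounds-guarded look-up at each forbidden position) instead of A's two passes, one over the keys and one nested scan of every word character against every constraint.
import Mathlib
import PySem

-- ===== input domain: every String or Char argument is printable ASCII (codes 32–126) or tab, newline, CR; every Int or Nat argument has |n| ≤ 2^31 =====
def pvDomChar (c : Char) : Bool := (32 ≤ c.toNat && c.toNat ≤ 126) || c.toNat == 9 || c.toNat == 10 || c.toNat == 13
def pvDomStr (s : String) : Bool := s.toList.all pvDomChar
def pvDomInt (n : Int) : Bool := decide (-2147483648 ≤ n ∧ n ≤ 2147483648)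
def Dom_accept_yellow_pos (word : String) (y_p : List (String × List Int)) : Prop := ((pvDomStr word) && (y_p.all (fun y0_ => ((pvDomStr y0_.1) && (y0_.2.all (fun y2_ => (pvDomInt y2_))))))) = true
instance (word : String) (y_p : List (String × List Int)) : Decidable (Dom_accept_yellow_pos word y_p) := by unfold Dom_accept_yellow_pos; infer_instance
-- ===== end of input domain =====

-- B replaces A's key-presence pass plus nested word-scan by one pass over the
-- constraints that indexes directly into the word (objective: simpler).

-- ===== PORT A =====
-- 'for val in y_p.keys(): if val not in word: return False'
def pvAKeys (word : String) : List (String × List Int) → Bool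
  | [] => true
  | (k, _) :: rest => if PySem.Str.isIn k word then pvAKeys word rest else false

-- inner 'for key, positions in y_p.items(): if sym == key: if i in positions: return False'
def pvAIn (c : Char) (i : Nat) : List (String × List Int) → Bool
  | [] => false
  | (k, ps) :: rest =>
      if k.toList = [c] then
        (if ps.contains (i : Int) then true else pvAIn c i rest)
      else pvAIn c i rest

-- 'for i, sym in enumerate(word): …'
def pvAScan (word : String) (y_p : List (String × List Int)) : Nat → List Char → Bool
  | _, [] => true
  | i, c :: cs => if pvAIn c i y_p then false else pvAScan word y_p (i + 1) cs

def accept_yellow_pos (word : String) (y_p : List (String × List Int)) : Bool :=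
  if y_p = [] then true
  else if pvAKeys word y_p then pvAScan word y_p 0 word.toList else false

-- ===== PORT B =====
-- 'any(0 <= p < n and word[p] == key for p in positions)'
def pvBHit (chars : List Char) (k : String) (ps : List Int) : Bool :=
  ps.any (fun p =>
    decide (0 ≤ p) && decide (p < (chars.length : Int)) &&
    decide (k.toList = [chars.getD p.toNat 'a']))

def accept_yellow_pos_alt (word : String) (y_p : List (String × List Int)) : Bool :=
  y_p.all (fun kp => PySem.Str.isIn kp.1 word && !(pvBHit word.toList kp.1 kp.2))

-- ===== PRECONDITION & SPEC =====
def Spec_accept_yellow_pos (word : String) (y_p : List (String × List Int)) (out : Bool) : Prop := out = accept_yellow_pos_alt word y_p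
instance (word : String) (y_p : List (String × List Int)) (out : Bool) : Decidable (Spec_accept_yellow_pos word y_p out) := by unfold Spec_accept_yellow_pos; infer_instance

-- ===== CLAIM (what is proved, stated in full; the proofs are below) =====
def Claim_equal_accept_yellow_pos : Prop := ∀ (word : String) (y_p : List (String × List Int)), Dom_accept_yellow_pos word y_p → Spec_accept_yellow_pos word y_p (accept_yellow_pos word y_p)

-- ===== LEMMAS AND PROOFS =====

theorem pvAKeys_eq_true_iff (word : String) (y_p : List (String × List Int)) :
    pvAKeys word y_p = true ↔ ∀ kp ∈ y_p, PySem.Str.isIn kp.1 word = true := by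
  induction y_p with
  | nil => simp [pvAKeys]
  | cons kp rest ih =>
      obtain ⟨k, ps⟩ := kp
      by_cases h : PySem.Str.isIn k word = true <;> simp_all [pvAKeys]

theorem pvAIn_eq_true_iff (c : Char) (i : Nat) (y_p : List (String × List Int)) :
    pvAIn c i y_p = true ↔ ∃ kp ∈ y_p, kp.1.toList = [c] ∧ (i : Int) ∈ kp.2 := by
  induction y_p with
  | nil => simp [pvAIn]
  | cons kp rest ih =>
      obtain ⟨k, ps⟩ := kp
      unfold pvAIn
      by_cases hk : k.toList = [c]
      · rw [if_pos hk]
        by_cases hp : ps.contains (i : Int) = true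
        · rw [if_pos hp]
          simp only [true_iff]
          exact ⟨(k, ps), by simp, hk, by simpa using hp⟩
        · rw [if_neg hp, ih]
          simp only [Bool.not_eq_true] at hp
          constructor
          · rintro ⟨kp', h1, h2⟩; exact ⟨kp', List.mem_cons_of_mem _ h1, h2⟩
          · rintro ⟨kp', h1, h2⟩
            rcases List.mem_cons.1 h1 with rfl | h1'
            · exact absurd h2.2 (by simpa using hp)
            · exact ⟨kp', h1', h2⟩
      · rw [if_neg hk, ih]
        constructor
        · rintro ⟨kp', h1, h2⟩; exact ⟨kp', List.mem_cons_of_mem _ h1, h2⟩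
        · rintro ⟨kp', h1, h2⟩
          rcases List.mem_cons.1 h1 with rfl | h1'
          · exact absurd h2.1 hk
          · exact ⟨kp', h1', h2⟩

theorem pvAScan_eq_true_iff (word : String) (y_p : List (String × List Int)) :
    ∀ (cs : List Char) (i : Nat),
      pvAScan word y_p i cs = true ↔ ∀ j (_ : j < cs.length), pvAIn cs[j] (i + j) y_p = false := by
  intro cs
  induction cs with
  | nil => simp [pvAScan]
  | cons c rest ih =>
      intro i
      unfold pvAScan
      by_cases h : pvAIn c i y_p = true
      · rw [if_pos h]
        constructor
        · intro hfalse; cases hfalse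
        · intro hall
          have h0 := hall 0 (by simp)
          simp [h] at h0
      · rw [Bool.not_eq_true] at h
        rw [if_neg (by simp [h]), ih (i + 1)]
        constructor
        · intro hall j hj
          cases j with
          | zero => simpa using h
          | succ j' =>
              simpa [Nat.add_comm, Nat.add_left_comm, Nat.add_assoc] using
                hall j' (by simpa using hj)
        · intro hall j hj
          simpa [Nat.add_comm, Nat.add_left_comm, Nat.add_assoc] using
            hall (j + 1) (by simpa using hj)

theorem pvBHit_eq_true_iff (chars : List Char) (k : String) (ps : List Int) :
    pvBHit chars k ps = true ↔
      ∃ p ∈ ps, 0 ≤ p ∧ p < (chars.length : Int) ∧ k.toList = [chars.getD p.toNat 'a'] := by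
  simp [pvBHit, and_assoc]

-- the crux: A's word-scan finds a hit iff B's direct position look-up finds one
theorem pv_hit_exchange (chars : List Char) (y_p : List (String × List Int)) :
    (∃ j, ∃ _ : j < chars.length, ∃ kp ∈ y_p, kp.1.toList = [chars[j]] ∧ (j : Int) ∈ kp.2) ↔
      (∃ kp ∈ y_p, ∃ p ∈ kp.2, 0 ≤ p ∧ p < (chars.length : Int) ∧ kp.1.toList = [chars.getD p.toNat 'a']) := by
  constructor
  · rintro ⟨j, hj, kp, hmem, hkey, hpos⟩
    refine ⟨kp, hmem, (j : Int), hpos, by positivity, by exact_mod_cast hj, ?_⟩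
    simpa [List.getD, hj] using hkey
  · rintro ⟨kp, hmem, p, hp, hp0, hplt, hkey⟩
    have hjlt : p.toNat < chars.length := by omega
    refine ⟨p.toNat, hjlt, kp, hmem, ?_, ?_⟩
    · simpa [List.getD, hjlt] using hkey
    · simpa [Int.toNat_of_nonneg hp0] using hp

theorem pv_eq (word : String) (y_p : List (String × List Int)) :
    accept_yellow_pos word y_p = accept_yellow_pos_alt word y_p := by
  by_cases hne : y_p = []
  · simp [accept_yellow_pos, accept_yellow_pos_alt, hne]
  rw [Bool.eq_iff_iff]
  unfold accept_yellow_pos accept_yellow_pos_alt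
  rw [if_neg hne]
  by_cases hk : pvAKeys word y_p = true
  · rw [if_pos hk, pvAScan_eq_true_iff, List.all_eq_true]
    rw [pvAKeys_eq_true_iff] at hk
    simp only [Nat.zero_add]
    constructor
    · intro hscan kp hmem
      have hnohit : ¬ pvBHit word.toList kp.1 kp.2 = true := by
        intro hhit
        rw [pvBHit_eq_true_iff] at hhit
        obtain ⟨p, hp, h0, hlt, hkey⟩ := hhit
        obtain ⟨j, hj, kp', hmem', hkey', hpos'⟩ :=
          (pv_hit_exchange word.toList y_p).2 ⟨kp, hmem, p, hp, h0, hlt, hkey⟩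
        have hcontra := hscan j hj
        rw [← Bool.not_eq_true, pvAIn_eq_true_iff] at hcontra
        exact hcontra ⟨kp', hmem', hkey', hpos'⟩
      rw [Bool.and_eq_true]
      exact ⟨hk kp hmem, by rw [Bool.not_eq_true']; exact Bool.eq_false_iff.mpr hnohit⟩
    · intro hall j hj
      rw [← Bool.not_eq_true, pvAIn_eq_true_iff]
      rintro ⟨kp, hmem, hkey, hpos⟩
      obtain ⟨kp', hmem', p, hp, h0, hlt, hkey'⟩ :=
        (pv_hit_exchange word.toList y_p).1 ⟨j, hj, kp, hmem, hkey, hpos⟩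
      have h2 := hall kp' hmem'
      rw [Bool.and_eq_true, Bool.not_eq_true'] at h2
      exact absurd ((pvBHit_eq_true_iff _ _ _).mpr ⟨p, hp, h0, hlt, hkey'⟩) (by simp [h2.2])
  · rw [if_neg hk]
    rw [pvAKeys_eq_true_iff] at hk
    constructor
    · intro hfalse; cases hfalse
    · intro hall
      exfalso
      apply hk
      intro kp hmem
      have h2 := (List.all_eq_true.1 hall) kp hmem
      rw [Bool.and_eq_true] at h2
      exact h2.1

-- ===== VERDICT (by name: the statement is the Claim_ definition above) =====
theorem accept_yellow_pos_spec : Claim_equal_accept_yellow_pos := by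
  intro word y_p _
  exact pv_eq word y_p
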